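-- pv_equiv track=rewrite | github.com/chebupelka8/PyPad-v.2 | scr/scripts/code_analyzer.py | find_tabs_in_string
-- ===== SOURCE A (Python) =====
-- def find_tabs_in_string(string: str, __cursor_index: int) -> int:
--     res = 0
--
--     for i, letter in enumerate(string):
--         if letter == "\t" and i < __cursor_index:
--             res += 1
--
--         else:
--             break
--
--     return res
-- ===== SOURCE B (Python) =====
-- def find_tabs_in_string(string: str, __cursor_index: int) -> int:
--     leading = len(string) - len(string.lstrip('\t'))
--     return max(0, min(leading, __cursor_index))
-- ===== Notes on version B (the rewrite author's own statement) =====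
-- stated objective: idiomatic
-- what changed: Replaces the explicit enumerate/early-break counting loop with a closed form: leading-tab count via lstrip, clamped by max(0, min(leading, cursor)).
import Mathlib
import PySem

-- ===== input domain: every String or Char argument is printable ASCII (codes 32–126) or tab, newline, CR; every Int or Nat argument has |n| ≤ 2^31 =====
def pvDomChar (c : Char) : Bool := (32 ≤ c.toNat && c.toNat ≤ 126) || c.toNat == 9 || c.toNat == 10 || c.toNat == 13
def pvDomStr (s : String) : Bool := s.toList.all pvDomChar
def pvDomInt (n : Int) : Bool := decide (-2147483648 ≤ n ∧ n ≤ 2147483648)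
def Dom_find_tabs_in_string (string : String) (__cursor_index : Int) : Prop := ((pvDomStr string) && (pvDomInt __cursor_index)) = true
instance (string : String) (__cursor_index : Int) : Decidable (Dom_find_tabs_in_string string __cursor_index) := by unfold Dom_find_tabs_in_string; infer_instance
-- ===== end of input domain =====

-- B replaces A's enumerate/early-break counting loop by a closed form (leading-tab count, clamped by the cursor); objective: idiomatic.


-- ===== PORT A =====
-- the for-loop with break over enumerate(string), carrying (i, res)
def findTabsLoop (ci : Int) : List Char → Int → Int → Int
  | [], _, res => res
  | c :: rest, i, res =>
      if c = '\t' ∧ i < ci then findTabsLoop ci rest (i + 1) (res + 1)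
      else res

def find_tabs_in_string (string : String) (__cursor_index : Int) : Int :=
  findTabsLoop __cursor_index string.toList 0 0

-- ===== PORT B =====
-- leading = len(string) - len(string.lstrip('\t')); lstrip('\t') ported as dropWhile (· = '\t') (exact: removes exactly the leading tabs)
def find_tabs_in_string_alt (string : String) (__cursor_index : Int) : Int :=
  let leading : Int := (string.toList.length : Int) - (string.toList.dropWhile (fun c => c = '\t')).length
  max 0 (min leading __cursor_index)

-- ===== PRECONDITION & SPEC =====
def Spec_find_tabs_in_string (string : String) (__cursor_index : Int) (out : Int) : Prop := out = find_tabs_in_string_alt string __cursor_index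
instance (string : String) (__cursor_index : Int) (out : Int) : Decidable (Spec_find_tabs_in_string string __cursor_index out) := by unfold Spec_find_tabs_in_string; infer_instance

-- ===== CLAIM (what is proved, stated in full; the proofs are below) =====
def Claim_equal_find_tabs_in_string : Prop := ∀ (string : String) (__cursor_index : Int), Dom_find_tabs_in_string string __cursor_index → Spec_find_tabs_in_string string __cursor_index (find_tabs_in_string string __cursor_index)

-- ===== LEMMAS AND PROOFS =====
theorem findTabsLoop_eq (ci : Int) (l : List Char) : ∀ (i res : Int),
    findTabsLoop ci l i res = res + max 0 (min ((l.takeWhile (fun c => c = '\t')).length : Int) (ci - i)) := by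
  induction l with
  | nil =>
    intro i res
    simp only [findTabsLoop, List.takeWhile_nil, List.length_nil, Int.natCast_zero]
    omega
  | cons c rest ih =>
    intro i res
    by_cases h : c = '\t' ∧ i < ci
    · rw [show findTabsLoop ci (c :: rest) i res = findTabsLoop ci rest (i + 1) (res + 1) from by
        simp [findTabsLoop, h], ih (i + 1) (res + 1)]
      simp only [List.takeWhile_cons, h.1, decide_true, if_true]
      have h2 := h.2
      have e1 : (('\t' :: List.takeWhile (fun c => decide (c = '\t')) rest).length : Int)
          = ((List.takeWhile (fun c => decide (c = '\t')) rest).length : Int) + 1 := by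
        simp
      omega
    · rw [show findTabsLoop ci (c :: rest) i res = res from by simp [findTabsLoop, h]]
      rcases Decidable.not_and_iff_not_or_not.mp h with hc | hi
      · simp [hc]
      · have hle : ci - i ≤ 0 := by omega
        have : min ((((c :: rest).takeWhile (fun c => c = '\t')).length : Int)) (ci - i) ≤ 0 :=
          le_trans (min_le_right _ _) hle
        omega

theorem take_drop_len (l : List Char) :
    ((l.takeWhile (fun c => c = '\t')).length : Int) =
      (l.length : Int) - (l.dropWhile (fun c => c = '\t')).length := by
  have := congrArg List.length (List.takeWhile_append_dropWhile (p := fun c => decide (c = '\t')) (l := l))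
  simp only [List.length_append] at this
  omega

-- ===== VERDICT (by name: the statement is the Claim_ definition above) =====
theorem find_tabs_in_string_spec : Claim_equal_find_tabs_in_string := by
  intro s ci _
  unfold Spec_find_tabs_in_string find_tabs_in_string find_tabs_in_string_alt
  rw [findTabsLoop_eq, take_drop_len]
  simp
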